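-- pv_equiv track=rewrite | github.com/irene-sophia/AdaptiveFIP | PeriodicReOpt/recalculate_fug_routes.py | recalc_fug_routes_city
-- ===== SOURCE A (Python) =====
-- def recalc_fug_routes_city(fugitive_routes_labeled, sensor_locations_labeled, sensor_triggered, time_interval):
--     """
--     Filters fugitive routes based on sensor triggers
--     """
--
--     fugitive_routes_filtered = []
--
--     # is any sensor triggered?
--     if any(sensor_triggered):
--
--         for r, fug_route in enumerate(fugitive_routes_labeled):
--             fug_route_can_be_true = False
--             for sensor, triggered in enumerate(sensor_triggered):
--                 # if the route should trigger the sensor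
--                 if sensor_locations_labeled[sensor] in [node for t, node in fug_route.items() if time_interval[0] <= t <= time_interval[1]]:
--                     # and the sensor is triggered
--                     if triggered:
--                         # this route can be the ground truth
--                         fug_route_can_be_true = True
--                         break
--
--             if fug_route_can_be_true:
--                 fugitive_routes_filtered.append(fug_route)
--
--     else:
--         for r, fug_route in enumerate(fugitive_routes_labeled):
--             fug_route_can_be_true = True
--             for sensor, triggered in enumerate(sensor_triggered):
--                 # if the route should trigger the sensor
--                 if sensor_locations_labeled[sensor] in [node for t, node in fug_route.items() if time_interval[0] <= t <= time_interval[1]]: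
--                     # but the sensor is not triggered
--                     if triggered == False:
--                         # this route cannot be the ground truth
--                         fug_route_can_be_true = False
--                         break
--
--             if fug_route_can_be_true:
--                 fugitive_routes_filtered.append(fug_route)
--
--     return fugitive_routes_filtered
-- ===== SOURCE B (Python) =====
-- def recalc_fug_routes_city(fugitive_routes_labeled, sensor_locations_labeled, sensor_triggered, time_interval):
--     """
--     Filters fugitive routes based on sensor triggers.
--     Build the set of relevant sensor locations once, then test each route's
--     time-window nodes against that set (iterating over route nodes, not sensors).
--     """
--     some_triggered = any(sensor_triggered)
--     if some_triggered:
--         # keep a route iff a window node lies on a triggered sensor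
--         relevant = {sensor_locations_labeled[s] for s, trig in enumerate(sensor_triggered) if trig}
--     else:
--         # keep a route iff no window node lies on an (untriggered) sensor
--         relevant = {sensor_locations_labeled[s] for s, trig in enumerate(sensor_triggered) if trig == False}
--     lo = time_interval[0]
--     hi = time_interval[1]
--     return [fug_route for fug_route in fugitive_routes_labeled
--             if any(node in relevant for t, node in fug_route.items() if lo <= t <= hi) == some_triggered]
-- ===== Notes on version B (the rewrite author's own statement) =====
-- stated objective: faster
-- what changed: B precomputes once the set of relevant sensor locations (triggered ones, or all when none triggered) and then, per route, scans the route's time-window nodes testing membership in that set, instead of A's per-route scan over all sensors with a list-comprehension membership test per sensor.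
-- outside the precondition, e.g. on recalc_fug_routes_city([], [], [True], (0, 0)): A returns [], B raises IndexError; on recalc_fug_routes_city([], [], [], ()): A returns [], B raises IndexError
import Mathlib
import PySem

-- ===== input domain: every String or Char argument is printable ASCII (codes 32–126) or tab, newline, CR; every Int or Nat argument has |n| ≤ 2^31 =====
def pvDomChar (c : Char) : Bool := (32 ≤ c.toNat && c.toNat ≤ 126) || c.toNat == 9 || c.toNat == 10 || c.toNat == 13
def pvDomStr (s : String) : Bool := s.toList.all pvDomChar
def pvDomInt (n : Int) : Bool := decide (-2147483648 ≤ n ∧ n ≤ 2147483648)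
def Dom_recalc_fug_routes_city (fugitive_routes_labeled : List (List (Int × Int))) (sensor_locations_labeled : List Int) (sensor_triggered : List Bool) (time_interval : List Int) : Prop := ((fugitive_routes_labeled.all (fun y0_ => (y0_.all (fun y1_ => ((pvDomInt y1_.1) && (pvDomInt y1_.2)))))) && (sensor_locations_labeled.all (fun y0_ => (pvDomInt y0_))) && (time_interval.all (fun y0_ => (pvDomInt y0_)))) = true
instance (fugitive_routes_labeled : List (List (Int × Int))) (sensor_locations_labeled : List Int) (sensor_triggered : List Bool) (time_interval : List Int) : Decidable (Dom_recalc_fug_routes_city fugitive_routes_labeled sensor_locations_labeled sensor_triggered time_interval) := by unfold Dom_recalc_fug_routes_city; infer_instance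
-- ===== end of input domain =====

-- B precomputes the set of relevant sensor locations once and scans each route's
-- time-window nodes against it, instead of A's per-route scan over all sensors: O(S + R·L) vs O(R·S·L).

-- ===== PORT A =====
-- [node for t, node in fug_route.items() if time_interval[0] <= t <= time_interval[1]]
def pvA_window (fug_route : List (Int × Int)) (time_interval : List Int) : List Int :=
  (fug_route.filter (fun tn =>
      decide ((PySem.List.pyGet? time_interval 0).getD 0 ≤ tn.1) &&
      decide (tn.1 ≤ (PySem.List.pyGet? time_interval 1).getD 0))).map (fun tn => tn.2)

-- inner sensor loop, any(sensor_triggered) branch: break on first in-window triggered sensor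
def pvA_loop1 (locs : List Int) (window : List Int) : List (Int × Bool) → Bool
  | [] => false
  | (s, trig) :: rest =>
    if window.contains ((PySem.List.pyGet? locs s).getD 0) then
      if trig then true else pvA_loop1 locs window rest
    else pvA_loop1 locs window rest

-- inner sensor loop, else branch: break on first in-window untriggered sensor
def pvA_loop2 (locs : List Int) (window : List Int) : List (Int × Bool) → Bool
  | [] => true
  | (s, trig) :: rest =>
    if window.contains ((PySem.List.pyGet? locs s).getD 0) then
      if trig == false then false else pvA_loop2 locs window rest
    else pvA_loop2 locs window rest

def recalc_fug_routes_city (fugitive_routes_labeled : List (List (Int × Int))) (sensor_locations_labeled : List Int) (sensor_triggered : List Bool) (time_interval : List Int) : List (List (Int × Int)) :=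
  if sensor_triggered.any id then
    fugitive_routes_labeled.foldl (fun acc fug_route =>
      if pvA_loop1 sensor_locations_labeled (pvA_window fug_route time_interval)
           (PySem.List.enumerate sensor_triggered) then acc ++ [fug_route] else acc) []
  else
    fugitive_routes_labeled.foldl (fun acc fug_route =>
      if pvA_loop2 sensor_locations_labeled (pvA_window fug_route time_interval)
           (PySem.List.enumerate sensor_triggered) then acc ++ [fug_route] else acc) []

-- ===== PORT B =====
def recalc_fug_routes_city_alt (fugitive_routes_labeled : List (List (Int × Int))) (sensor_locations_labeled : List Int) (sensor_triggered : List Bool) (time_interval : List Int) : List (List (Int × Int)) :=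
  let some_triggered := sensor_triggered.any id
  let relevant : PySem.Set Int :=
    if some_triggered then
      PySem.Set.ofList (((PySem.List.enumerate sensor_triggered).filter (fun p => p.2)).map
        (fun p => (PySem.List.pyGet? sensor_locations_labeled p.1).getD 0))
    else
      PySem.Set.ofList (((PySem.List.enumerate sensor_triggered).filter (fun p => p.2 == false)).map
        (fun p => (PySem.List.pyGet? sensor_locations_labeled p.1).getD 0))
  let lo := (PySem.List.pyGet? time_interval 0).getD 0
  let hi := (PySem.List.pyGet? time_interval 1).getD 0
  fugitive_routes_labeled.filter (fun fug_route =>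
    ((fug_route.filter (fun tn => decide (lo ≤ tn.1) && decide (tn.1 ≤ hi))).any
        (fun tn => PySem.Set.contains relevant tn.2)) == some_triggered)

-- ===== PRECONDITION & SPEC =====
-- Pre_ excludes inputs where some sensor index has no location (sensor_triggered longer than
-- sensor_locations_labeled) or time_interval has fewer than 2 entries: there A generally raises
-- IndexError (and returns only in degenerate cases its loops never reach, where B raises).
def Pre_recalc_fug_routes_city (fugitive_routes_labeled : List (List (Int × Int))) (sensor_locations_labeled : List Int) (sensor_triggered : List Bool) (time_interval : List Int) : Prop :=
  sensor_triggered.length ≤ sensor_locations_labeled.length ∧ 2 ≤ time_interval.length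
instance (fugitive_routes_labeled : List (List (Int × Int))) (sensor_locations_labeled : List Int) (sensor_triggered : List Bool) (time_interval : List Int) : Decidable (Pre_recalc_fug_routes_city fugitive_routes_labeled sensor_locations_labeled sensor_triggered time_interval) := by unfold Pre_recalc_fug_routes_city; infer_instance

def pvWitness_recalc_fug_routes_city : (List (List (Int × Int))) × List Int × List Bool × List Int :=
  ([[(0, 3), (1, 4)], [(0, 5)]], [4, 5], [true, false], [0, 1])

def Spec_recalc_fug_routes_city (fugitive_routes_labeled : List (List (Int × Int))) (sensor_locations_labeled : List Int) (sensor_triggered : List Bool) (time_interval : List Int) (out : List (List (Int × Int))) : Prop := out = recalc_fug_routes_city_alt fugitive_routes_labeled sensor_locations_labeled sensor_triggered time_interval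
instance (fugitive_routes_labeled : List (List (Int × Int))) (sensor_locations_labeled : List Int) (sensor_triggered : List Bool) (time_interval : List Int) (out : List (List (Int × Int))) : Decidable (Spec_recalc_fug_routes_city fugitive_routes_labeled sensor_locations_labeled sensor_triggered time_interval out) := by unfold Spec_recalc_fug_routes_city; infer_instance

-- ===== CLAIM (what is proved, stated in full; the proofs are below) =====
def Claim_equal_recalc_fug_routes_city : Prop := ∀ (fugitive_routes_labeled : List (List (Int × Int))) (sensor_locations_labeled : List Int) (sensor_triggered : List Bool) (time_interval : List Int), Dom_recalc_fug_routes_city fugitive_routes_labeled sensor_locations_labeled sensor_triggered time_interval → Pre_recalc_fug_routes_city fugitive_routes_labeled sensor_locations_labeled sensor_triggered time_interval → Spec_recalc_fug_routes_city fugitive_routes_labeled sensor_locations_labeled sensor_triggered time_interval (recalc_fug_routes_city fugitive_routes_labeled sensor_locations_labeled sensor_triggered time_interval)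

-- ===== LEMMAS AND PROOFS =====
-- A's break-loop 1 answers: does some (index, triggered) pair hit the window with triggered = true?
theorem pvA_loop1_eq_any (locs window : List Int) (ps : List (Int × Bool)) :
    pvA_loop1 locs window ps =
      ps.any (fun p => p.2 && window.contains ((PySem.List.pyGet? locs p.1).getD 0)) := by
  induction ps with
  | nil => rfl
  | cons p rest ih =>
    obtain ⟨s, trig⟩ := p
    simp only [pvA_loop1, List.any_cons, ih]
    by_cases hw : window.contains ((PySem.List.pyGet? locs s).getD 0) <;>
      cases trig <;> simp [hw]

-- A's break-loop 2 answers: does NO (index, triggered) pair hit the window with triggered = false?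
theorem pvA_loop2_eq_all (locs window : List Int) (ps : List (Int × Bool)) :
    pvA_loop2 locs window ps =
      ps.all (fun p => !(!p.2 && window.contains ((PySem.List.pyGet? locs p.1).getD 0))) := by
  induction ps with
  | nil => rfl
  | cons p rest ih =>
    obtain ⟨s, trig⟩ := p
    simp only [pvA_loop2, List.all_cons, ih]
    by_cases hw : window.contains ((PySem.List.pyGet? locs s).getD 0) <;>
      cases trig <;> simp [hw]

-- the append-accumulating filter fold is List.filter
theorem foldl_filter_append {α : Type} (f : α → Bool) (xs : List α) (acc : List α) :
    xs.foldl (fun acc x => if f x then acc ++ [x] else acc) acc = acc ++ xs.filter f := by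
  induction xs generalizing acc with
  | nil => simp
  | cons x xs ih =>
    by_cases h : f x <;> simp [List.foldl_cons, h, ih]

-- per-route test, triggered branch: A's sensor scan = B's window scan over the triggered-location set
theorem keep_eq1 (fr : List (Int × Int)) (locs : List Int) (trig : List Bool) (ti : List Int) :
    pvA_loop1 locs (pvA_window fr ti) (PySem.List.enumerate trig) =
      (((fr.filter (fun tn => decide ((PySem.List.pyGet? ti 0).getD 0 ≤ tn.1) &&
            decide (tn.1 ≤ (PySem.List.pyGet? ti 1).getD 0))).any
          (fun tn => PySem.Set.contains
            (PySem.Set.ofList (((PySem.List.enumerate trig).filter (fun p => p.2)).map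
              (fun p => (PySem.List.pyGet? locs p.1).getD 0))) tn.2)) == true) := by
  rw [pvA_loop1_eq_any, Bool.eq_iff_iff]
  simp only [beq_iff_eq, List.any_eq_true, Bool.and_eq_true, List.contains_eq_mem,
    decide_eq_true_eq, pvA_window, List.mem_map, List.mem_filter, PySem.Set.contains,
    PySem.Set.mem_ofList]
  aesop

-- per-route test, untriggered branch: A's sensor scan = B's window scan over the untriggered-location set
theorem keep_eq2 (fr : List (Int × Int)) (locs : List Int) (trig : List Bool) (ti : List Int) :
    pvA_loop2 locs (pvA_window fr ti) (PySem.List.enumerate trig) =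
      (((fr.filter (fun tn => decide ((PySem.List.pyGet? ti 0).getD 0 ≤ tn.1) &&
            decide (tn.1 ≤ (PySem.List.pyGet? ti 1).getD 0))).any
          (fun tn => PySem.Set.contains
            (PySem.Set.ofList (((PySem.List.enumerate trig).filter (fun p => p.2 == false)).map
              (fun p => (PySem.List.pyGet? locs p.1).getD 0))) tn.2)) == false) := by
  rw [pvA_loop2_eq_all]
  have hq : (fun p : Int × Bool => p.2 == false) = (fun p : Int × Bool => !p.2) := by
    funext p; cases p.2 <;> simp
  rw [hq, List.all_eq_not_any_not]
  simp only [Bool.not_not]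
  have hb : ∀ b : Bool, (b == false) = !b := by intro b; cases b <;> simp
  rw [hb]
  congr 1
  rw [Bool.eq_iff_iff]
  simp only [List.any_eq_true, Bool.and_eq_true, Bool.not_eq_true', List.contains_eq_mem,
    decide_eq_true_eq, pvA_window, List.mem_map, List.mem_filter, PySem.Set.contains,
    PySem.Set.mem_ofList]
  aesop

-- ===== VERDICT (by name: the statement is the Claim_ definition above) =====
theorem recalc_fug_routes_city_spec : Claim_equal_recalc_fug_routes_city := by
  intro routes locs trig ti _ _
  unfold Spec_recalc_fug_routes_city recalc_fug_routes_city recalc_fug_routes_city_alt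
  by_cases ht : trig.any id
  · simp only [ht, if_pos, foldl_filter_append, List.nil_append]
    exact List.filter_congr (fun fr _ => keep_eq1 fr locs trig ti)
  · simp only [ht, if_neg, Bool.false_eq_true, not_false_iff, foldl_filter_append,
      List.nil_append]
    exact List.filter_congr (fun fr _ => keep_eq2 fr locs trig ti)
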